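-- pv_equiv track=rewrite | github.com/fluoxetines73/Advance-Programming---Assignment-3-Symbol-Table | SymbolTable_khanhdio.py | rprint_scope
-- ===== SOURCE A (Python) =====
-- def rprint_scope(state):
--     def collect_symbols_with_levels(scopes, level, seen_symbols):
--         if level < 0:
--             return []
--
--         current_scope = scopes[len(scopes) - 1 - level]
--
--         def process_names(names_list, seen, acc):
--             if not names_list:
--                 return acc
--
--             name = names_list[0]
--             rest = names_list[1:]
--
--             if name in seen:
--                 return process_names(rest, seen, acc)
--             else:
--                 return process_names(rest, seen | {name}, acc + [(name, level)])
--
--         names = list(current_scope.keys())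
--         current_level_symbols = process_names(names, seen_symbols, [])
--
--         return collect_symbols_with_levels(scopes, level - 1, seen_symbols | set(name for name, _ in current_level_symbols)) + current_level_symbols
--
--     symbol_info = collect_symbols_with_levels(state, len(state) - 1, set())
--
--     def format_symbols(symbols):
--         if not symbols:
--             return []
--         name, level = symbols[0]
--         return [f"{name}//{level}"] + format_symbols(symbols[1:])
--
--     reversed_symbols = list(reversed(symbol_info))
--     result = format_symbols(reversed_symbols)
--
--     return " ".join(result) if result else ""
-- ===== SOURCE B (Python) =====
-- def rprint_scope(state):
--     n = len(state)
--     first = {}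
--     for i, scope in enumerate(state):
--         for name in scope:
--             if name not in first:
--                 first[name] = i
--     parts = []
--     for i, scope in enumerate(state):
--         for name in reversed(list(scope)):
--             if first[name] == i:
--                 parts.append(f"{name}//{n - 1 - i}")
--     return " ".join(parts)
-- ===== Notes on version B (the rewrite author's own statement) =====
-- stated objective: faster
-- what changed: A's high-to-low recursive collect (seen-set threading via repeated list concatenation and set unions) followed by a global reverse and a recursive formatter is replaced by two plain forward passes: build a dict mapping each name to its first-occurrence scope index, then emit the formatted pieces scope by scope (keys reversed within a scope) keeping names whose first occurrence is that scope.
import Mathlib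
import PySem

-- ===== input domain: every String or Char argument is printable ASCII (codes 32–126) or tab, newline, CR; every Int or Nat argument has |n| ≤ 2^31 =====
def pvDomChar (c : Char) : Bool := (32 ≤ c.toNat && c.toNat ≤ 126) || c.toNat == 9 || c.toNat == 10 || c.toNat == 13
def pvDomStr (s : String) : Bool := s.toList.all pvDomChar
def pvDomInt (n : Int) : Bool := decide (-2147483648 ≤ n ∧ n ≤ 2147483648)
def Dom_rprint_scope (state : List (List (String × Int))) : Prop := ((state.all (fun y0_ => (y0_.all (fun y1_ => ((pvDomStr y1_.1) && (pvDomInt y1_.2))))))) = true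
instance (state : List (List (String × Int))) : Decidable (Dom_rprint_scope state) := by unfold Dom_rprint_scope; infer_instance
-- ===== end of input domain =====

-- B replaces A's high-to-low recursive collect-then-global-reverse by two forward passes
-- (first-occurrence-index dict, then emit scope by scope); measured faster (objective: faster).

-- ===== PORT A =====
-- inner helper process_names(names_list, seen, acc)
def pvProcessNames (level : Int) : List String → PySem.Set String → List (String × Int) → List (String × Int)
  | [], _, acc => acc
  | name :: rest, seen, acc =>
    if PySem.Set.contains seen name then pvProcessNames level rest seen acc
    else pvProcessNames level rest (PySem.Set.union seen [name]) (acc ++ [(name, level)])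

-- inner helper collect_symbols_with_levels(scopes, level, seen_symbols)
def pvCollect (scopes : List (List (String × Int))) (level : Int) (seen : PySem.Set String) : List (String × Int) :=
  if level < 0 then []
  else
    match PySem.List.pyGet? scopes (PySem.List.len scopes - 1 - level) with
    | none => []  -- totality guard: unreachable, the index is always in range here
    | some currentScope =>
      let names := (PySem.Dict.ofList currentScope).keys
      let currentLevelSymbols := pvProcessNames level names seen []
      pvCollect scopes (level - 1)
        (PySem.Set.union seen (PySem.Set.ofList (currentLevelSymbols.map Prod.fst)))
        ++ currentLevelSymbols
termination_by (level + 1).toNat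
decreasing_by omega

-- inner helper format_symbols(symbols)
def pvFormatSymbols : List (String × Int) → List String
  | [] => []
  | (name, level) :: rest => (name ++ "//" ++ PySem.Int.toStr level) :: pvFormatSymbols rest

def rprint_scope (state : List (List (String × Int))) : String :=
  let symbolInfo := pvCollect state (PySem.List.len state - 1) PySem.Set.empty
  let result := pvFormatSymbols symbolInfo.reverse
  if result ≠ [] then PySem.Str.join " " result else ""

-- ===== PORT B =====
def rprint_scope_alt (state : List (List (String × Int))) : String :=
  let n := PySem.List.len state
  let first := (PySem.List.enumerate state).foldl
    (fun d p => ((PySem.Dict.ofList p.2).keys).foldl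
      (fun d name => if d.contains name then d else d.insert name p.1) d)
    PySem.Dict.empty
  let parts := (PySem.List.enumerate state).foldl
    (fun acc p => ((PySem.Dict.ofList p.2).keys).reverse.foldl
      (fun acc name =>
        if PySem.Dict.getD first name 0 == p.1 then
          acc ++ [name ++ "//" ++ PySem.Int.toStr (n - 1 - p.1)]
        else acc)
      acc)
    []
  PySem.Str.join " " parts

-- ===== PRECONDITION & SPEC =====
def Spec_rprint_scope (state : List (List (String × Int))) (out : String) : Prop := out = rprint_scope_alt state
instance (state : List (List (String × Int))) (out : String) : Decidable (Spec_rprint_scope state out) := by unfold Spec_rprint_scope; infer_instance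

-- ===== CLAIM (what is proved, stated in full; the proofs are below) =====
def Claim_equal_rprint_scope : Prop := ∀ (state : List (List (String × Int))), Dom_rprint_scope state → Spec_rprint_scope state (rprint_scope state)

-- ===== LEMMAS AND PROOFS =====

-- keys of a scope, as the Python dict sees them (unique, insertion order)
def pvKeys (sc : List (String × Int)) : List String := (PySem.Dict.ofList sc).keys

-- all names declared in scopes with index < i
def pvSeenB (state : List (List (String × Int))) (i : Nat) : List String :=
  (state.take i).flatMap pvKeys

-- the names whose first occurrence is in scope i, in that scope's key order
def pvNew (state : List (List (String × Int))) (i : Nat) : List String :=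
  (pvKeys (state.getD i [])).filter (fun x => !(pvSeenB state i).contains x)

-- blocks for indices j..(n-1), highest index first, paired with level n-1-i
def pvBlocksD (state : List (List (String × Int))) (j : Nat) : List (String × Int) :=
  if _h : j < state.length then
    pvBlocksD state (j+1) ++ (pvNew state j).map (fun x => (x, (state.length : Int) - 1 - j))
  else []
termination_by state.length - j

-- the formatted output pieces for scopes j..(n-1), in scope order, reversed keys inside a scope
def pvEmit (state : List (List (String × Int))) (j : Nat) : List String :=
  if _h : j < state.length then
    ((pvNew state j).reverse.map (fun x => x ++ "//" ++ PySem.Int.toStr ((state.length : Int) - 1 - j)))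
      ++ pvEmit state (j+1)
  else []
termination_by state.length - j

theorem pvProcessNames_spec (level : Int) (names : List String) (seen : PySem.Set String)
    (acc : List (String × Int)) (hnd : names.Nodup) :
    pvProcessNames level names seen acc
      = acc ++ (names.filter (fun x => !(PySem.Set.contains seen x))).map (fun x => (x, level)) := by
  induction names generalizing seen acc with
  | nil => simp [pvProcessNames]
  | cons name rest ih =>
    rcases List.nodup_cons.mp hnd with ⟨hn, hrest⟩
    by_cases h : PySem.Set.contains seen name
    · have hm : name ∈ seen := by simpa using h
      rw [pvProcessNames, if_pos h, ih _ _ hrest]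
      simp [hm]
    · have hm : name ∉ seen := by simpa using h
      have hcong : rest.filter (fun x => !(PySem.Set.contains (PySem.Set.union seen [name]) x))
          = rest.filter (fun x => !(PySem.Set.contains seen x)) := by
        apply List.filter_congr
        intro x hx
        have hne : x ≠ name := fun he => hn (he ▸ hx)
        simp [pysem, hne, PySem.Set.union]
      rw [pvProcessNames, if_neg h, ih _ _ hrest, hcong]
      simp [hm]

theorem pvCollect_step (state : List (List (String × Int))) (L : Int) (seen : PySem.Set String)
    (cur : List (String × Int))
    (hget : PySem.List.pyGet? state (PySem.List.len state - 1 - L) = some cur) (hneg : ¬ L < 0) :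
    pvCollect state L seen
      = pvCollect state (L - 1)
          (PySem.Set.union seen (PySem.Set.ofList
            ((pvProcessNames L ((PySem.Dict.ofList cur).keys) seen []).map Prod.fst)))
        ++ pvProcessNames L ((PySem.Dict.ofList cur).keys) seen [] := by
  rw [pvCollect, if_neg hneg, hget]

theorem pvCollect_spec (state : List (List (String × Int))) (L : Int) (seen : PySem.Set String)
    (hL : L < state.length)
    (hseen : ∀ x, PySem.Set.contains seen x = (pvSeenB state (state.length - 1 - L).toNat).contains x) :
    pvCollect state L seen = pvBlocksD state (state.length - 1 - L).toNat := by
  have key : ∀ (m : Nat) (L : Int) (seen : PySem.Set String), (L + 1).toNat = m → L < state.length →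
      (∀ x, PySem.Set.contains seen x = (pvSeenB state (state.length - 1 - L).toNat).contains x) →
      pvCollect state L seen = pvBlocksD state (state.length - 1 - L).toNat := by
    intro m
    induction m using Nat.strong_induction_on with
    | _ m ih =>
      intro L seen hm hL hseen
      by_cases hneg : L < 0
      · rw [pvCollect, if_pos hneg, pvBlocksD, dif_neg (by omega)]
      · set i : Nat := ((state.length : Int) - 1 - L).toNat with hidef
        have hi : i < state.length := by omega
        have hLi : L = (state.length : Int) - 1 - (i : Int) := by omega
        have hget : PySem.List.pyGet? state (PySem.List.len state - 1 - L) = some (state[i]'hi) := by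
          have h0 : (0:Int) ≤ PySem.List.len state - 1 - L := by
            simp only [PySem.List.len_eq]; omega
          have h2 : PySem.List.len state - 1 - L < state.length := by
            simp only [PySem.List.len_eq]; omega
          rw [PySem.List.pyGet?_eq_some_getElem state h0 h2]
          simp only [PySem.List.len_eq]
          rfl
        have hnd : ((PySem.Dict.ofList (state[i]'hi)).keys).Nodup := PySem.Dict.nodup_keys_ofList _
        have hcur : pvProcessNames L ((PySem.Dict.ofList (state[i]'hi)).keys) seen []
            = (pvNew state i).map (fun x => (x, L)) := by
          rw [pvProcessNames_spec _ _ _ _ hnd]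
          have hfe : (fun x => !(PySem.Set.contains seen x)) = (fun x => !(pvSeenB state i).contains x) := by
            funext x; rw [hseen x]
          rw [List.nil_append, hfe]
          unfold pvNew pvKeys
          rw [List.getD_eq_getElem state [] hi]
        have hfst : (((pvNew state i).map (fun x => (x, L))).map Prod.fst) = pvNew state i := by
          simp [Function.comp_def]
        have hsome : state[i]? = some (state[i]'hi) := List.getElem?_eq_getElem hi
        have hnewmem : ∀ x, x ∈ pvNew state i ↔ (x ∈ pvKeys (state[i]'hi) ∧ x ∉ pvSeenB state i) := by
          intro x
          simp [pvNew, List.mem_filter, hsome]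
        have hseenB : pvSeenB state (i+1) = pvSeenB state i ++ pvKeys (state[i]'hi) := by
          unfold pvSeenB
          rw [List.take_add_one, List.flatMap_append]
          simp [hi]
        have hseen' : ∀ x, PySem.Set.contains (PySem.Set.union seen (PySem.Set.ofList (pvNew state i))) x
            = (pvSeenB state (i+1)).contains x := by
          intro x
          apply Bool.coe_iff_coe.mp
          have hx := Bool.coe_iff_coe.mpr (hseen x)
          simp only [PySem.Set.contains_iff, List.contains_iff_mem] at hx ⊢
          rw [PySem.Set.mem_union, PySem.Set.mem_ofList, hseenB]
          rw [List.mem_append]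
          constructor
          · rintro (h | h)
            · exact Or.inl (hx.mp h)
            · exact Or.inr ((hnewmem x).mp h).1
          · rintro (h | h)
            · exact Or.inl (hx.mpr h)
            · by_cases hsb : x ∈ pvSeenB state i
              · exact Or.inl (hx.mpr hsb)
              · exact Or.inr ((hnewmem x).mpr ⟨h, hsb⟩)
        have hnext : ((state.length : Int) - 1 - (L - 1)).toNat = i + 1 := by omega
        have ihres := ih L.toNat (by omega) (L - 1)
          (PySem.Set.union seen (PySem.Set.ofList (pvNew state i)))
          (by omega) (by omega) (by rw [hnext]; exact hseen')
        rw [hnext] at ihres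
        rw [pvCollect_step state L seen _ hget hneg, hcur, hfst, ihres]
        conv_rhs => rw [pvBlocksD]
        rw [dif_pos hi]
        congr 1
        exact List.map_congr_left (fun x _ => by rw [hLi])
  exact key _ L seen rfl hL hseen

theorem pvFormatSymbols_eq_map (l : List (String × Int)) :
    pvFormatSymbols l = l.map (fun p => p.1 ++ "//" ++ PySem.Int.toStr p.2) := by
  induction l with
  | nil => rfl
  | cons p rest ih => cases p; simp [pvFormatSymbols, ih]

theorem pvBlocksD_reverse_format (state : List (List (String × Int))) (j : Nat) :
    pvFormatSymbols (pvBlocksD state j).reverse = pvEmit state j := by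
  have key : ∀ (m j : Nat), state.length - j = m →
      pvFormatSymbols (pvBlocksD state j).reverse = pvEmit state j := by
    intro m
    induction m using Nat.strong_induction_on with
    | _ m ih =>
      intro j hm
      by_cases hj : j < state.length
      · rw [pvBlocksD, dif_pos hj, pvEmit, dif_pos hj, ← ih (state.length - (j+1)) (by omega) (j+1) rfl]
        rw [List.reverse_append, pvFormatSymbols_eq_map, pvFormatSymbols_eq_map,
          List.map_append, List.map_reverse, List.map_map, List.map_reverse]
        simp [Function.comp_def]
      · rw [pvBlocksD, dif_neg hj, pvEmit, dif_neg hj]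
        rfl
  exact key _ j rfl

theorem pvFirstInner (names : List String) (j : Int) (d : PySem.Dict String Int) (x : String) :
    (names.foldl (fun d name => if d.contains name then d else d.insert name j) d).get? x
      = if d.contains x = false ∧ x ∈ names then some j else d.get? x := by
  induction names generalizing d with
  | nil => simp
  | cons name rest ih =>
    rw [List.foldl_cons, ih]
    by_cases hc : d.contains name
    · rw [if_pos hc]
      by_cases hx : x = name
      · subst hx
        simp [hc]
      · simp [hx]
    · rw [if_neg hc]
      by_cases hx : x = name
      · subst hx
        simp [PySem.Dict.get?_insert_self, Bool.eq_false_iff.mpr hc]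
      · simp [PySem.Dict.contains_insert, PySem.Dict.get?_insert_of_ne, hx,
          beq_false_of_ne hx]

theorem pvFirstOuter (scopes : List (List (String × Int))) (j : Int) (d : PySem.Dict String Int)
    (x : String) :
    ((PySem.List.enumerate scopes j).foldl
        (fun d p => ((PySem.Dict.ofList p.2).keys).foldl
          (fun d name => if d.contains name then d else d.insert name p.1) d) d).get? x
      = if d.contains x then d.get? x
        else (scopes.findIdx? (fun sc => (pvKeys sc).contains x)).map (fun k => j + (k : Int)) := by
  induction scopes generalizing j d with
  | nil =>
    simp only [PySem.List.enumerate_nil, List.foldl_nil, List.findIdx?_nil]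
    by_cases hc : d.contains x
    · rw [if_pos hc]
    · rw [if_neg hc]
      rw [PySem.Dict.contains_eq_isSome_get?] at hc
      cases h : d.get? x with
      | none => rfl
      | some v => rw [h] at hc; simp at hc
  | cons sc rest ih =>
    rw [PySem.List.enumerate_cons, List.foldl_cons, ih, List.findIdx?_cons]
    rw [PySem.Dict.contains_eq_isSome_get?, pvFirstInner]
    by_cases hc : d.contains x
    · have hs : (d.get? x).isSome = true := by
        rw [← PySem.Dict.contains_eq_isSome_get?]; exact hc
      simp [hc, hs]
    · have hgn : d.get? x = none := by
        have hc' := hc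
        rw [PySem.Dict.contains_eq_isSome_get?] at hc'
        cases h : d.get? x with
        | none => rfl
        | some v => rw [h] at hc'; simp at hc'
      by_cases hk : x ∈ (PySem.Dict.ofList sc).keys
      · have hp : (pvKeys sc).contains x = true := by simp [pvKeys, hk]
        simp [Bool.eq_false_iff.mpr hc, hk]
        rw [if_pos (show x ∈ pvKeys sc from hk)]
        simp
      · have hp : (pvKeys sc).contains x = false := by simp [pvKeys, hk]
        simp only [hgn, hp, Option.isSome_none, Bool.false_eq_true, if_false,
          Bool.eq_false_iff.mpr hc, hk, and_false]
        cases hr : rest.findIdx? (fun sc => (pvKeys sc).contains x) with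
        | none => rfl
        | some k =>
          simp
          omega

theorem pvSeenB_iff (state : List (List (String × Int))) (x : String) (i : Nat) :
    x ∈ pvSeenB state i ↔ ∃ j, ∃ _h : j < state.length, j < i ∧ x ∈ pvKeys (state[j]'(by omega)) := by
  unfold pvSeenB
  rw [List.mem_flatMap]
  constructor
  · rintro ⟨sc, hsc, hx⟩
    rw [List.mem_take_iff_getElem] at hsc
    obtain ⟨j, hj, rfl⟩ := hsc
    exact ⟨j, by omega, by omega, hx⟩
  · rintro ⟨j, hj, hji, hx⟩
    refine ⟨state[j], List.mem_take_iff_getElem.mpr ⟨j, by omega, rfl⟩, hx⟩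

theorem pvCond_eq (state : List (List (String × Int))) (i : Nat) (hi : i < state.length)
    (x : String) (hx : x ∈ pvKeys (state[i]'hi)) :
    ((((state.findIdx? (fun sc => (pvKeys sc).contains x)).map (fun k => (k : Int))).getD 0)
        == (i : Int))
      = !(pvSeenB state i).contains x := by
  cases hfind : state.findIdx? (fun sc => (pvKeys sc).contains x) with
  | none =>
    rw [List.findIdx?_eq_none_iff] at hfind
    have hni : x ∉ pvKeys (state[i]'hi) := by
      simpa using hfind (state[i]'hi) (List.getElem_mem hi)
    exact absurd hx hni
  | some k =>
    rw [List.findIdx?_eq_some_iff_getElem] at hfind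
    obtain ⟨hk, hpk, hmin⟩ := hfind
    show ((k : Int) == (i : Int)) = !(pvSeenB state i).contains x
    by_cases hki : k = i
    · subst hki
      have hnot : x ∉ pvSeenB state k := by
        intro hmem
        obtain ⟨j, hjn, hji, hxj⟩ := (pvSeenB_iff state x k).mp hmem
        have := hmin j hji
        simp [hxj] at this
      simp [hnot]
    · have hmem : x ∈ pvSeenB state i := by
        rcases Nat.lt_or_ge k i with hlt | hge
        · exact (pvSeenB_iff state x i).mpr ⟨k, by omega, hlt, by
            exact List.mem_of_elem_eq_true hpk⟩
        · have hik : i < k := by omega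
          have := hmin i hik
          simp [hx] at this
      have : ((k : Int) == (i : Int)) = false := by
        simp only [beq_eq_false_iff_ne, ne_eq, Int.natCast_inj]
        exact hki
      simp [this, hmem]

theorem pvPartsFold (first : PySem.Dict String Int) (n : Int)
    (scopes : List (List (String × Int))) (j : Int) (acc : List String) :
    (PySem.List.enumerate scopes j).foldl
      (fun acc p => ((PySem.Dict.ofList p.2).keys).reverse.foldl
        (fun acc name =>
          if PySem.Dict.getD first name 0 == p.1 then
            acc ++ [name ++ "//" ++ PySem.Int.toStr (n - 1 - p.1)]
          else acc) acc) acc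
    = acc ++ (PySem.List.enumerate scopes j).flatMap (fun p =>
        (((PySem.Dict.ofList p.2).keys).reverse.filter
            (fun name => PySem.Dict.getD first name 0 == p.1)).map
          (fun name => name ++ "//" ++ PySem.Int.toStr (n - 1 - p.1))) := by
  induction scopes generalizing j acc with
  | nil => simp [PySem.List.enumerate_nil]
  | cons sc rest ih =>
    rw [PySem.List.enumerate_cons, List.foldl_cons, PySem.List.foldl_append_if, ih,
      List.flatMap_cons, List.append_assoc]

theorem pvEmit_eq_flatMap (state : List (List (String × Int))) (j : Nat) :
    (PySem.List.enumerate (state.drop j) (j : Int)).flatMap (fun p =>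
        (((PySem.Dict.ofList p.2).keys).reverse.filter
            (fun name => PySem.Dict.getD
              ((PySem.List.enumerate state).foldl
                (fun d p => ((PySem.Dict.ofList p.2).keys).foldl
                  (fun d name => if d.contains name then d else d.insert name p.1) d)
                PySem.Dict.empty) name 0 == p.1)).map
          (fun name => name ++ "//" ++ PySem.Int.toStr ((state.length : Int) - 1 - p.1)))
      = pvEmit state j := by
  have key : ∀ (m j : Nat), state.length - j = m →
      (PySem.List.enumerate (state.drop j) (j : Int)).flatMap (fun p =>
        (((PySem.Dict.ofList p.2).keys).reverse.filter
            (fun name => PySem.Dict.getD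
              ((PySem.List.enumerate state).foldl
                (fun d p => ((PySem.Dict.ofList p.2).keys).foldl
                  (fun d name => if d.contains name then d else d.insert name p.1) d)
                PySem.Dict.empty) name 0 == p.1)).map
          (fun name => name ++ "//" ++ PySem.Int.toStr ((state.length : Int) - 1 - p.1)))
      = pvEmit state j := by
    intro m
    induction m using Nat.strong_induction_on with
    | _ m ih =>
      intro j hm
      by_cases hj : j < state.length
      · rw [List.drop_eq_getElem_cons hj, PySem.List.enumerate_cons, List.flatMap_cons,
          pvEmit, dif_pos hj]
        have hrest : ((j : Int) + 1) = ((j + 1 : Nat) : Int) := by push_cast; ring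
        rw [hrest, ih (state.length - (j+1)) (by omega) (j+1) rfl]
        congr 1
        have hfirst : ∀ name, name ∈ (PySem.Dict.ofList (state[j]'hj)).keys →
            (PySem.Dict.getD
              ((PySem.List.enumerate state).foldl
                (fun d p => ((PySem.Dict.ofList p.2).keys).foldl
                  (fun d name => if d.contains name then d else d.insert name p.1) d)
                PySem.Dict.empty) name 0 == (j : Int))
            = !(pvSeenB state j).contains name := by
          intro name hname
          rw [PySem.Dict.getD_eq_get?_getD, pvFirstOuter]
          rw [if_neg (by simp [PySem.Dict.contains_empty])]
          have hmap : ((state.findIdx? (fun sc => (pvKeys sc).contains name)).map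
              (fun k => (0 : Int) + (k : Int)))
              = ((state.findIdx? (fun sc => (pvKeys sc).contains name)).map
              (fun k => (k : Int))) := by
            cases state.findIdx? (fun sc => (pvKeys sc).contains name) with
            | none => rfl
            | some k => simp
          rw [hmap]
          exact pvCond_eq state j hj name hname
        have hfc : ((PySem.Dict.ofList (state[j]'hj)).keys).reverse.filter
              (fun name => PySem.Dict.getD
                ((PySem.List.enumerate state).foldl
                  (fun d p => ((PySem.Dict.ofList p.2).keys).foldl
                    (fun d name => if d.contains name then d else d.insert name p.1) d)
                  PySem.Dict.empty) name 0 == (j : Int))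
            = (pvNew state j).reverse := by
          rw [List.filter_reverse]
          congr 1
          rw [List.filter_congr (fun x hx => hfirst x hx)]
          unfold pvNew pvKeys
          rw [List.getD_eq_getElem state [] hj]
        rw [hfc]
      · rw [pvEmit, dif_neg hj, List.drop_eq_nil_of_le (by omega), PySem.List.enumerate_nil,
          List.flatMap_nil]
  exact key _ j rfl

theorem rprint_scope_spec : Claim_equal_rprint_scope := by
  intro state _hdom
  unfold Spec_rprint_scope rprint_scope rprint_scope_alt
  simp only [PySem.List.len_eq]
  have hseen0 : ∀ x, PySem.Set.contains PySem.Set.empty x = (pvSeenB state 0).contains x := by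
    intro x; rfl
  have hA := pvCollect_spec state ((state.length : Int) - 1) PySem.Set.empty (by omega)
    (by rw [show (((state.length : Int)) - 1 - ((state.length : Int) - 1)).toNat = 0 by omega]
        exact hseen0)
  rw [show (((state.length : Int)) - 1 - ((state.length : Int) - 1)).toNat = 0 by omega] at hA
  rw [hA, pvBlocksD_reverse_format]
  have hB := pvPartsFold
    ((PySem.List.enumerate state).foldl
      (fun d p => ((PySem.Dict.ofList p.2).keys).foldl
        (fun d name => if d.contains name then d else d.insert name p.1) d)
      PySem.Dict.empty)
    ((state.length : Int)) state 0 []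
  rw [hB, List.nil_append]
  have hdrop : state.drop 0 = state := by simp
  have hE := pvEmit_eq_flatMap state 0
  rw [hdrop] at hE
  rw [show ((0 : Nat) : Int) = (0 : Int) from rfl] at hE
  rw [hE]
  by_cases h : pvEmit state 0 = []
  · rw [h]
    rfl
  · rw [if_pos h]
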